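-- pv_equiv track=rewrite | github.com/flyonthewallai/PulsePlan | backend/app/agents/core/orchestration/intent_processor.py | _is_simple_conversation
-- ===== SOURCE A (Python) =====
-- def _is_simple_conversation(user_query: str) -> bool:
--     """Check if query is a simple conversational request that doesn't need intent classification"""
--     query_lower = user_query.lower().strip()
--
--     # Simple greeting patterns
--     greeting_patterns = [
--         'hi', 'hello', 'hey', 'good morning', 'good afternoon', 'good evening',
--         'how are you', 'how are you doing', 'what\'s up', 'how\'s it going',
--         'nice to meet you', 'pleased to meet you', 'good to see you'
--     ]
--
--     # Simple question patterns
--     question_patterns = [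
--         'how are you', 'how are you doing', 'what\'s up', 'how\'s it going',
--         'how was your day', 'how was your weekend', 'how\'s everything',
--         'what are you up to', 'what\'s new', 'how do you feel'
--     ]
--
--     # Check for exact matches or starts with
--     for pattern in greeting_patterns + question_patterns:
--         if query_lower == pattern or query_lower.startswith(pattern + ' '):
--             return True
--
--     # Check for very short queries (likely conversational)
--     if len(query_lower.split()) <= 3 and not any(word in query_lower for word in ['task', 'create', 'delete', 'schedule', 'search', 'email']):
--         return True
--
--     return False
-- ===== SOURCE B (Python) =====
-- _PATTERNS = frozenset([
--     'hi', 'hello', 'hey', 'good morning', 'good afternoon', 'good evening',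
--     'how are you', 'how are you doing', "what's up", "how's it going",
--     'nice to meet you', 'pleased to meet you', 'good to see you',
--     'how was your day', 'how was your weekend', "how's everything",
--     'what are you up to', "what's new", 'how do you feel',
-- ])
--
-- _TASK_WORDS = ('task', 'create', 'delete', 'schedule', 'search', 'email')
--
--
-- def _is_simple_conversation(user_query: str) -> bool:
--     """Check if query is a simple conversational request that doesn't need intent classification"""
--     query_lower = user_query.lower().strip()
--
--     # Exact match against the pattern set
--     if query_lower in _PATTERNS:
--         return True
--
--     # A pattern followed by a space: check every prefix ending at a space
--     for i, ch in enumerate(query_lower):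
--         if ch == ' ' and query_lower[:i] in _PATTERNS:
--             return True
--
--     # Very short queries (likely conversational)
--     if len(query_lower.split()) <= 3 and not any(word in query_lower for word in _TASK_WORDS):
--         return True
--
--     return False
-- ===== Notes on version B (the rewrite author's own statement) =====
-- stated objective: idiomatic
-- what changed: A scans all 23 patterns testing per pattern equality or a startswith of the pattern followed by a space; B builds one frozenset of the patterns and instead looks up the whole query and each query prefix ending at a space character in that set, keeping the identical short-query fallback.
import Mathlib
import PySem

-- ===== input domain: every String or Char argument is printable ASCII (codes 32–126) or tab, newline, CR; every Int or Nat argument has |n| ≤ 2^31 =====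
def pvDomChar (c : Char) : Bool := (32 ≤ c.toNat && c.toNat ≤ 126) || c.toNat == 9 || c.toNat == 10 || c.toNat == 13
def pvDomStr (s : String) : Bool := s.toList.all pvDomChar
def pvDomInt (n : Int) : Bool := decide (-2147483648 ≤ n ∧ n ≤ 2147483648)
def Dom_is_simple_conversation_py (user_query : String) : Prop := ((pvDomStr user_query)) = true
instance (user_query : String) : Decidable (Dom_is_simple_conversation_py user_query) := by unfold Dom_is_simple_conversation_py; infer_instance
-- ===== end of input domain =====

-- B replaces A's scan over all 23 patterns (equality / startswith per pattern) by one frozenset of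
-- the patterns looked up at the query itself and at each prefix of the query ending at a space
-- (objective: idiomatic/alternative; same observable behaviour, no speed claim).

-- ===== PORT A =====
def pvGreetingPatterns : List (List Char) :=
  ["hi".toList, "hello".toList, "hey".toList, "good morning".toList, "good afternoon".toList,
   "good evening".toList, "how are you".toList, "how are you doing".toList, "what's up".toList,
   "how's it going".toList, "nice to meet you".toList, "pleased to meet you".toList,
   "good to see you".toList]

def pvQuestionPatterns : List (List Char) :=
  ["how are you".toList, "how are you doing".toList, "what's up".toList, "how's it going".toList,
   "how was your day".toList, "how was your weekend".toList, "how's everything".toList,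
   "what are you up to".toList, "what's new".toList, "how do you feel".toList]

def pvTaskWords : List (List Char) :=
  ["task".toList, "create".toList, "delete".toList, "schedule".toList, "search".toList,
   "email".toList]

def is_simple_conversation_py (user_query : String) : Bool :=
  -- query_lower = user_query.lower().strip(), inlined at each use
  -- 'for pattern in …: if … : return True' is the any-fold over the concatenated pattern lists
  if (pvGreetingPatterns ++ pvQuestionPatterns).any
      (fun pattern => PySem.Chars.strip (PySem.Chars.lower user_query.toList) == pattern ||
        PySem.Chars.startswith (PySem.Chars.strip (PySem.Chars.lower user_query.toList)) (pattern ++ [' '])) then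
    true
  else if (PySem.Chars.split₀ (PySem.Chars.strip (PySem.Chars.lower user_query.toList))).length ≤ 3 &&
      !(pvTaskWords.any (fun word => PySem.Chars.isIn word (PySem.Chars.strip (PySem.Chars.lower user_query.toList)))) then
    true
  else
    false

-- ===== PORT B =====
-- the frozenset of all greeting+question patterns (literals from Source B; Python dedups on construction)
def pvPatternSet : PySem.Set (List Char) :=
  PySem.Set.ofList
    ["hi".toList, "hello".toList, "hey".toList, "good morning".toList, "good afternoon".toList,
     "good evening".toList, "how are you".toList, "how are you doing".toList, "what's up".toList,
     "how's it going".toList, "nice to meet you".toList, "pleased to meet you".toList,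
     "good to see you".toList, "how was your day".toList, "how was your weekend".toList,
     "how's everything".toList, "what are you up to".toList, "what's new".toList,
     "how do you feel".toList]

def is_simple_conversation_py_alt (user_query : String) : Bool :=
  -- query_lower = user_query.lower().strip(), inlined at each use
  if PySem.Set.contains pvPatternSet (PySem.Chars.strip (PySem.Chars.lower user_query.toList)) then
    true
  else if (PySem.List.enumerate (PySem.Chars.strip (PySem.Chars.lower user_query.toList)) 0).any
      (fun p => p.2 == ' ' &&
        PySem.Set.contains pvPatternSet
          (PySem.List.slice (PySem.Chars.strip (PySem.Chars.lower user_query.toList)) none (some p.1))) then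
    true
  else if (PySem.Chars.split₀ (PySem.Chars.strip (PySem.Chars.lower user_query.toList))).length ≤ 3 &&
      !(pvTaskWords.any (fun word => PySem.Chars.isIn word (PySem.Chars.strip (PySem.Chars.lower user_query.toList)))) then
    true
  else
    false

-- ===== PRECONDITION & SPEC =====
def Spec_is_simple_conversation_py (user_query : String) (out : Bool) : Prop := out = is_simple_conversation_py_alt user_query
instance (user_query : String) (out : Bool) : Decidable (Spec_is_simple_conversation_py user_query out) := by unfold Spec_is_simple_conversation_py; infer_instance

-- ===== CLAIM (what is proved, stated in full; the proofs are below) =====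
def Claim_equal_is_simple_conversation_py : Prop := ∀ (user_query : String), Dom_is_simple_conversation_py user_query → Spec_is_simple_conversation_py user_query (is_simple_conversation_py user_query)

-- ===== LEMMAS AND PROOFS =====

-- membership in A's concatenated (duplicate-carrying) pattern list coincides with membership in B's set
lemma mem_patterns_iff (q : List Char) :
    q ∈ pvGreetingPatterns ++ pvQuestionPatterns ↔ q ∈ pvPatternSet := by
  have h1 : pvGreetingPatterns ++ pvQuestionPatterns ⊆ pvPatternSet := by decide
  have h2 : (pvPatternSet : List (List Char)) ⊆ pvGreetingPatterns ++ pvQuestionPatterns := by decide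
  exact ⟨fun h => h1 h, fun h => h2 h⟩

-- "some pattern followed by a space is a prefix of q" ⟺ "some space position i of q has q.take i a pattern"
lemma prefix_space_iff (L : List (List Char)) (q : List Char) :
    (∃ p ∈ L, p ++ [' '] <+: q) ↔
      ∃ k, ∃ _ : k < q.length, q[k] = ' ' ∧ q.take k ∈ L := by
  constructor
  · rintro ⟨p, hp, hpre⟩
    have hlen : p.length + 1 ≤ q.length := by
      have := hpre.length_le; simpa using this
    have htake : p ++ [' '] = q.take (p.length + 1) := by
      have := List.prefix_iff_eq_take.mp hpre
      simpa using this
    refine ⟨p.length, by omega, ?_, ?_⟩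
    · have h1 : q.take (p.length + 1) = q.take p.length ++ q[p.length]?.toList :=
        List.take_add_one
      have h2 : q[p.length]? = some q[p.length] := List.getElem?_eq_getElem (by omega)
      have : p ++ [' '] = q.take p.length ++ [q[p.length]] := by
        rw [htake, h1, h2]; rfl
      have := List.append_inj' this (by simp)
      simpa using this.2.symm
    · have h1 : q.take (p.length + 1) = q.take p.length ++ q[p.length]?.toList :=
        List.take_add_one
      have h2 : q[p.length]? = some q[p.length] := List.getElem?_eq_getElem (by omega)
      have : p ++ [' '] = q.take p.length ++ [q[p.length]] := by
        rw [htake, h1, h2]; rfl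
      have := List.append_inj' this (by simp)
      rw [← this.1]; exact hp
  · rintro ⟨k, hk, hsp, hmem⟩
    refine ⟨q.take k, hmem, ?_⟩
    have h1 : q.take (k + 1) = q.take k ++ q[k]?.toList := List.take_add_one
    have h2 : q[k]? = some q[k] := List.getElem?_eq_getElem hk
    have : q.take k ++ [' '] = q.take (k + 1) := by rw [h1, h2, hsp]; rfl
    rw [this]; exact List.take_prefix _ _

-- the two pattern tests agree on every query
lemma pattern_test_eq (q : List Char) :
    ((pvGreetingPatterns ++ pvQuestionPatterns).any
      (fun pattern => q == pattern || PySem.Chars.startswith q (pattern ++ [' '])))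
    = (PySem.Set.contains pvPatternSet q ||
       (PySem.List.enumerate q 0).any
         (fun p => p.2 == ' ' &&
           PySem.Set.contains pvPatternSet (PySem.List.slice q none (some p.1)))) := by
  rw [Bool.eq_iff_iff]
  simp only [List.any_eq_true, Bool.or_eq_true, Bool.and_eq_true, beq_iff_eq,
    PySem.Chars.startswith_iff, PySem.Set.contains, List.contains_iff_mem,
    PySem.List.mem_enumerate_iff]
  constructor
  · rintro ⟨p, hp, hq | hpre⟩
    · exact Or.inl (by rw [hq]; exact (mem_patterns_iff p).mp hp)
    · refine Or.inr ?_
      obtain ⟨k, hk, hsp, hmem⟩ := (prefix_space_iff (pvGreetingPatterns ++ pvQuestionPatterns) q).mp ⟨p, hp, hpre⟩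
      refine ⟨(0 + (k : Int), q[k]), ⟨k, hk, rfl⟩, hsp, ?_⟩
      have : PySem.List.slice q none (some ((0 : Int) + (k : Int))) = q.take k := by
        rw [PySem.List.slice_to q (by omega)]
        congr 1; omega
      rw [this]; exact (mem_patterns_iff _).mp hmem
  · rintro (hq | ⟨pr, ⟨k, hk, hpr⟩, hsp, hmem⟩)
    · exact ⟨q, (mem_patterns_iff q).mpr hq, Or.inl rfl⟩
    · subst hpr
      have hsl : PySem.List.slice q none (some ((0 : Int) + (k : Int))) = q.take k := by
        rw [PySem.List.slice_to q (by omega)]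
        congr 1; omega
      rw [hsl] at hmem
      obtain ⟨p, hp, hpre⟩ :=
        (prefix_space_iff (pvGreetingPatterns ++ pvQuestionPatterns) q).mpr
          ⟨k, hk, by simpa using hsp, (mem_patterns_iff _).mpr hmem⟩
      exact ⟨p, hp, Or.inr hpre⟩

-- ===== VERDICT (by name: the statement is the Claim_ definition above) =====
-- splitting the disjunctive first test of A into B's two cascaded ifs
lemma if_or_split (a b c : Bool) :
    (if (a || b) = true then true else if c = true then true else false)
    = (if a = true then true else if b = true then true else if c = true then true else false) := by
  cases a <;> cases b <;> simp

theorem is_simple_conversation_py_spec : Claim_equal_is_simple_conversation_py := by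
  intro user_query _
  unfold Spec_is_simple_conversation_py is_simple_conversation_py is_simple_conversation_py_alt
  rw [pattern_test_eq, if_or_split]
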